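-- pv_equiv track=rewrite | github.com/Ayudh-M/llmtrial | src/control_trailer.py | _balanced_json
-- ===== SOURCE A (Python) =====
-- def _balanced_json(payload: str) -> bool:
--     depth = 0
--     in_string = False
--     escape = False
--     for char in payload:
--         if in_string:
--             if escape:
--                 escape = False
--                 continue
--             if char == "\\":
--                 escape = True
--                 continue
--             if char == '"':
--                 in_string = False
--             continue
--
--         if char == '"':
--             in_string = True
--         elif char == "{":
--             depth += 1
--         elif char == "}":
--             depth -= 1
--             if depth < 0:
--                 return False
--
--     return depth == 0 and not in_string
-- ===== SOURCE B (Python) =====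
-- def _balanced_json(payload: str) -> bool:
--     # Phase 1: strip quoted string literals (handling backslash escapes),
--     # keeping the non-string characters and whether we ended inside a string.
--     rest = []
--     mode = 0  # 0 = outside string, 1 = inside string, 2 = after backslash inside string
--     for ch in payload:
--         if mode == 0:
--             if ch == '"':
--                 mode = 1
--             else:
--                 rest.append(ch)
--         elif mode == 1:
--             if ch == '\\':
--                 mode = 2
--             elif ch == '"':
--                 mode = 0
--         else:
--             mode = 1
--     in_string = mode != 0
--     # Phase 2: brace balance over the non-string characters.
--     depth = 0
--     for ch in rest:
--         if ch == '{':
--             depth += 1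
--         elif ch == '}':
--             depth -= 1
--             if depth < 0:
--                 return False
--     return depth == 0 and not in_string
-- ===== Notes on version B (the rewrite author's own statement) =====
-- stated objective: alternative
-- what changed: Replaces A's single interleaved state machine with two separate passes: a string-stripping phase (with a 3-valued mode for escapes) that collects non-string characters, followed by a plain brace-depth counting phase over the stripped characters.
import Mathlib
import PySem

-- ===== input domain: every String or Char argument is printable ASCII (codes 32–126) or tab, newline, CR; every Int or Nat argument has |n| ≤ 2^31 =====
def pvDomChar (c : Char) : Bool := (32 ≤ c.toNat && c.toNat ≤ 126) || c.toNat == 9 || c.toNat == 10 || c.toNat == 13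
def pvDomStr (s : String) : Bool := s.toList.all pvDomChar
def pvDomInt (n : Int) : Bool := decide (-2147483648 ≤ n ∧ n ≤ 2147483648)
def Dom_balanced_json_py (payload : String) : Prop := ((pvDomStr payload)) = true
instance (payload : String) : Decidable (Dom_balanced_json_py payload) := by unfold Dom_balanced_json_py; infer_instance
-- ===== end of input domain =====

-- B splits A's single interleaved state machine into a string-stripping pass followed by a
-- brace-counting pass (objective: alternative decomposition, same cost).

-- ===== PORT A =====
-- the for-loop of A, state = (depth, in_string, escape); early `return False` is the literal `false`
def pvLoopA : List Char → Int → Bool → Bool → Bool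
  | [], d, instr, _ => d == 0 && !instr
  | c :: cs, d, instr, esc =>
    if instr then
      if esc then pvLoopA cs d instr false
      else if c = '\\' then pvLoopA cs d instr true
      else if c = '"' then pvLoopA cs d false esc
      else pvLoopA cs d instr esc
    else
      if c = '"' then pvLoopA cs d true esc
      else if c = '{' then pvLoopA cs (d + 1) instr esc
      else if c = '}' then
        if d - 1 < 0 then false else pvLoopA cs (d - 1) instr esc
      else pvLoopA cs d instr esc

def balanced_json_py (payload : String) : Bool := pvLoopA payload.toList 0 false false

-- ===== PORT B =====
-- phase 1: strip quoted strings; acc collects kept characters (Python's `rest.append`),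
-- mode: 0 = outside string, 1 = inside, 2 = after backslash; returns (rest, ended inside string)
def pvStripB : List Char → List Char → Nat → List Char × Bool
  | [], acc, mode => (acc.reverse, mode != 0)
  | c :: cs, acc, mode =>
    if mode = 0 then
      if c = '"' then pvStripB cs acc 1 else pvStripB cs (c :: acc) 0
    else if mode = 1 then
      if c = '\\' then pvStripB cs acc 2
      else if c = '"' then pvStripB cs acc 0
      else pvStripB cs acc 1
    else pvStripB cs acc 1

-- phase 2: brace depth over the stripped characters; none = early `return False`
def pvCountB : List Char → Int → Option Int
  | [], d => some d
  | c :: cs, d =>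
    if c = '{' then pvCountB cs (d + 1)
    else if c = '}' then
      if d - 1 < 0 then none else pvCountB cs (d - 1)
    else pvCountB cs d

def balanced_json_py_alt (payload : String) : Bool :=
  let p := pvStripB payload.toList [] 0
  match pvCountB p.1 0 with
  | none => false
  | some d => d == 0 && !p.2

-- ===== PRECONDITION & SPEC =====
def Spec_balanced_json_py (payload : String) (out : Bool) : Prop := out = balanced_json_py_alt payload
instance (payload : String) (out : Bool) : Decidable (Spec_balanced_json_py payload out) := by unfold Spec_balanced_json_py; infer_instance

-- ===== CLAIM (what is proved, stated in full; the proofs are below) =====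
def Claim_equal_balanced_json_py : Prop := ∀ (payload : String), Dom_balanced_json_py payload → Spec_balanced_json_py payload (balanced_json_py payload)

-- ===== LEMMAS AND PROOFS =====

-- running B's two phases from depth d, as one Bool
def pvEvalB (p : List Char × Bool) (d : Int) : Bool :=
  match pvCountB p.1 d with
  | none => false
  | some d' => d' == 0 && !p.2

theorem pvStripB_acc (cs : List Char) : ∀ (acc : List Char) (m : Nat),
    pvStripB cs acc m = (acc.reverse ++ (pvStripB cs [] m).1, (pvStripB cs [] m).2) := by
  induction cs with
  | nil => intro acc m; simp [pvStripB]
  | cons c cs ih =>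
    intro acc m
    simp only [pvStripB]
    split_ifs <;>
      first
        | (rw [ih (c :: acc) 0, ih [c] 0]; simp)
        | (rw [ih acc 0])
        | (rw [ih acc 1])
        | (rw [ih acc 2])

theorem pvStripB_keep (cs : List Char) (c : Char) :
    pvStripB cs [c] 0 = (c :: (pvStripB cs [] 0).1, (pvStripB cs [] 0).2) := by
  rw [pvStripB_acc cs [c] 0]; simp

theorem pvEvalB_cons (c : Char) (R : List Char) (f : Bool) (d : Int) :
    pvEvalB (c :: R, f) d =
      (if c = '{' then pvEvalB (R, f) (d + 1)
       else if c = '}' then (if d - 1 < 0 then false else pvEvalB (R, f) (d - 1))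
       else pvEvalB (R, f) d) := by
  simp only [pvEvalB, pvCountB]
  split_ifs <;> rfl

theorem pvMain (cs : List Char) : ∀ (m : Nat) (d : Int), m ≤ 2 →
    pvLoopA cs d (m != 0) (m == 2) = pvEvalB (pvStripB cs [] m) d := by
  induction cs with
  | nil =>
    intro m d _
    simp [pvLoopA, pvStripB, pvEvalB, pvCountB]
  | cons c cs ih =>
    intro m d hm
    match m, hm with
    | 0, _ =>
      by_cases hq : c = '"'
      · simpa [pvLoopA, pvStripB, hq] using ih 1 d (by omega)
      · rw [show pvStripB (c :: cs) [] 0 = pvStripB cs [c] 0 by simp [pvStripB, hq],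
            pvStripB_keep, pvEvalB_cons]
        by_cases ho : c = '{'
        · simpa [pvLoopA, hq, ho] using ih 0 (d + 1) (by omega)
        · by_cases hc : c = '}'
          · by_cases hd : d - 1 < 0
            · simp [pvLoopA, hc, hd]
            · simpa [pvLoopA, hq, ho, hc, hd] using ih 0 (d - 1) (by omega)
          · simpa [pvLoopA, hq, ho, hc] using ih 0 d (by omega)
    | 1, _ =>
      by_cases hb : c = '\\'
      · simpa [pvLoopA, pvStripB, hb] using ih 2 d (by omega)
      · by_cases hq : c = '"'
        · simpa [pvLoopA, pvStripB, hb, hq] using ih 0 d (by omega)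
        · simpa [pvLoopA, pvStripB, hb, hq] using ih 1 d (by omega)
    | 2, _ =>
      simpa [pvLoopA, pvStripB] using ih 1 d (by omega)

-- ===== VERDICT (by name: the statement is the Claim_ definition above) =====
theorem balanced_json_py_spec : Claim_equal_balanced_json_py := by
  intro payload _
  unfold Spec_balanced_json_py balanced_json_py balanced_json_py_alt
  simpa [pvEvalB] using pvMain payload.toList 0 0 (by omega)
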